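-- pv_equiv track=rewrite | github.com/Nezeon/Repurpose.ai | backend/app/agents/kegg_agent.py | _parse_kegg_flat
-- ===== SOURCE A (Python) =====
-- from typing import Dict, List, Any, Optional
--
-- def _parse_kegg_flat(text: str) -> Dict:
--     """Parse KEGG flat file format."""
--     data = {}
--     current_key = None
--     current_values = []
--
--     for line in text.split("\n"):
--         if not line or line.startswith("///"):
--             continue
--
--         if line[0] != " ":
--             # New field
--             if current_key and current_values:
--                 data[current_key] = current_values
--
--             parts = line.split(None, 1)
--             current_key = parts[0] if parts else None
--             current_values = [parts[1].strip()] if len(parts) > 1 else []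
--         else:
--             # Continuation of previous field
--             current_values.append(line.strip())
--
--     if current_key and current_values:
--         data[current_key] = current_values
--
--     return data
-- ===== SOURCE B (Python) =====
-- def _parse_kegg_flat(text: str) -> dict:
--     """Parse KEGG flat file format (two-phase: group lines into blocks, then build dict)."""
--     lines = [ln for ln in text.split("\n") if ln and not ln.startswith("///")]
--     blocks = []
--     for ln in lines:
--         if ln[0] != " ":
--             blocks.append([ln])
--         elif blocks:
--             blocks[-1].append(ln)
--     data = {}
--     for header, *rest in blocks:
--         parts = header.split(None, 1)
--         if not parts:
--             continue
--         values = ([parts[1].strip()] if len(parts) > 1 else []) + [c.strip() for c in rest]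
--         if values:
--             data[parts[0]] = values
--     return data
-- ===== Notes on version B (the rewrite author's own statement) =====
-- stated objective: alternative
-- what changed: Replaces A's single stateful pass (current_key/current_values with mid-loop and final flushes) by two separate phases: first group the filtered lines into raw field blocks, then map each block to its key/values and insert it into the dict.
import Mathlib
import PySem

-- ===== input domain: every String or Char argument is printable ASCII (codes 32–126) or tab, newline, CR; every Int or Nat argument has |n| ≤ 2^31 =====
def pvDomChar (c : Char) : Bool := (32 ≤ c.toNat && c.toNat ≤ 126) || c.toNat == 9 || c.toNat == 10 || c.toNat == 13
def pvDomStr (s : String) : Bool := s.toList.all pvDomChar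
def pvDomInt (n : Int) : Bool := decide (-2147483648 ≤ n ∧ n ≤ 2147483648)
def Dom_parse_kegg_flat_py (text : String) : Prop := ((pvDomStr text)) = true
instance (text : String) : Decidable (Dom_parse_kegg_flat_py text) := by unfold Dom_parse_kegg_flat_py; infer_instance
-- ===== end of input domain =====

-- B replaces A's single stateful pass (current_key/current_values with flushes) by two phases:
-- group the filtered lines into raw field blocks, then map each block to its key/values entry ("alternative", same cost).

-- ===== PORT A =====
-- shared port of Python's line.split(None, 1) header parse: key = parts[0], values = [parts[1].strip()] if present
def pvKeyOf (line : String) : Option String := (PySem.Str.split₀Max line 1).head?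

def pvValsOf (line : String) : List String :=
  let parts := PySem.Str.split₀Max line 1
  if 1 < parts.length then [PySem.Str.strip (parts.getD 1 "")] else []

-- A's flush: `if current_key and current_values: data[current_key] = current_values`
-- (current_key is None or a whitespace-split token, hence never "", so truthiness of the key is `isSome`)
def pvFlushA (d : PySem.Dict String (List String)) (k : Option String) (v : List String) :
    PySem.Dict String (List String) :=
  match k with
  | some s => if v ≠ [] then d.insert s v else d
  | none => d

-- one iteration of A's loop over `text.split("\n")`
def pvStepA (st : PySem.Dict String (List String) × Option String × List String) (line : String) :
    PySem.Dict String (List String) × Option String × List String :=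
  if line = "" ∨ PySem.Str.startswith line "///" = true then st
  else if PySem.Str.pyGet? line 0 ≠ some ' ' then
    (pvFlushA st.1 st.2.1 st.2.2, pvKeyOf line, pvValsOf line)
  else (st.1, st.2.1, st.2.2 ++ [PySem.Str.strip line])

def parse_kegg_flat_py (text : String) : List (String × List String) :=
  let st := ((PySem.Str.split? text "\n").getD []).foldl pvStepA (PySem.Dict.empty, none, [])
  (pvFlushA st.1 st.2.1 st.2.2).items

-- ===== PORT B =====
-- the comprehension filter: `ln and not ln.startswith("///")`
def pvLineKeep (ln : String) : Bool := !(ln == "") && !(PySem.Str.startswith ln "///")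

-- phase 1: one iteration of the block-grouping loop
def pvStepBlocks (bs : List (List String)) (ln : String) : List (List String) :=
  if PySem.Str.pyGet? ln 0 ≠ some ' ' then bs ++ [[ln]]
  else if bs = [] then bs
  else bs.dropLast ++ [bs.getLastD [] ++ [ln]]

-- phase 2: one block → at most one dict entry
def pvInsertBlock (d : PySem.Dict String (List String)) (b : List String) :
    PySem.Dict String (List String) :=
  let header := b.headD ""
  let rest := b.tail
  match PySem.Str.split₀Max header 1 with
  | [] => d
  | k :: ps =>
    let values := (if ps ≠ [] then [PySem.Str.strip (ps.headD "")] else [])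
                    ++ rest.map PySem.Str.strip
    if values ≠ [] then d.insert k values else d

def parse_kegg_flat_py_alt (text : String) : List (String × List String) :=
  let lines := ((PySem.Str.split? text "\n").getD []).filter pvLineKeep
  let blocks : List (List String) := lines.foldl pvStepBlocks []
  (blocks.foldl pvInsertBlock PySem.Dict.empty).items

-- ===== PRECONDITION & SPEC =====
def Spec_parse_kegg_flat_py (text : String) (out : List (String × List String)) : Prop := out = parse_kegg_flat_py_alt text
instance (text : String) (out : List (String × List String)) : Decidable (Spec_parse_kegg_flat_py text out) := by unfold Spec_parse_kegg_flat_py; infer_instance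

-- ===== CLAIM (what is proved, stated in full; the proofs are below) =====
def Claim_equal_parse_kegg_flat_py : Prop := ∀ (text : String), Dom_parse_kegg_flat_py text → Spec_parse_kegg_flat_py text (parse_kegg_flat_py text)

-- ===== LEMMAS AND PROOFS =====

-- skipped lines are identities of A's step, so A's fold equals the fold over B's filtered lines
theorem pvStepA_skip (st : PySem.Dict String (List String) × Option String × List String)
    (ln : String) (h : pvLineKeep ln = false) : pvStepA st ln = st := by
  unfold pvLineKeep at h
  unfold pvStepA
  simp only [Bool.and_eq_false_iff, Bool.not_eq_false', beq_iff_eq, PySem.Str.startswith_eq] at h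
  rcases h with h | h
  · simp [h]
  · rw [show "///".toList = ['/', '/', '/'] from rfl] at h
    simp [h]

theorem pvFoldA_filter (ls : List String)
    (st : PySem.Dict String (List String) × Option String × List String) :
    ls.foldl pvStepA st = (ls.filter pvLineKeep).foldl pvStepA st := by
  induction ls generalizing st with
  | nil => rfl
  | cons x tl ih =>
    by_cases hx : pvLineKeep x = true
    · simp [hx, ih]
    · simp only [Bool.not_eq_true] at hx
      simp [hx, pvStepA_skip st x hx, ih]

-- on a kept line A's step takes its non-skip branches
theorem pvStepA_keep (st : PySem.Dict String (List String) × Option String × List String)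
    (ln : String) (h : pvLineKeep ln = true) :
    pvStepA st ln =
      (if PySem.Str.pyGet? ln 0 ≠ some ' ' then
        (pvFlushA st.1 st.2.1 st.2.2, pvKeyOf ln, pvValsOf ln)
      else (st.1, st.2.1, st.2.2 ++ [PySem.Str.strip ln])) := by
  unfold pvLineKeep at h
  simp only [Bool.and_eq_true, Bool.not_eq_true', PySem.Str.startswith_eq] at h
  rw [show "///".toList = ['/', '/', '/'] from rfl] at h
  unfold pvStepA
  have h1 : ln ≠ "" := by simpa using h.1
  simp [h1, h.2]

-- A's flush of a parsed block equals B's per-block insertion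
theorem pvFlush_eq_insertBlock (d : PySem.Dict String (List String)) (hb : String)
    (cs : List String) :
    pvFlushA d (pvKeyOf hb) (pvValsOf hb ++ cs.map PySem.Str.strip)
      = pvInsertBlock d (hb :: cs) := by
  unfold pvFlushA pvInsertBlock pvKeyOf pvValsOf
  cases hp : PySem.Str.split₀Max hb 1 with
  | nil => simp [hp]
  | cons k ps =>
    cases ps with
    | nil => simp [hp]
    | cons p ps' => simp [hp]

-- a nonempty prefix block is never touched again by the grouping fold
theorem pvStepBlocks_cons (b : List String) (bs : List (List String)) (hbs : bs ≠ [])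
    (ln : String) : pvStepBlocks (b :: bs) ln = b :: pvStepBlocks bs ln := by
  unfold pvStepBlocks
  cases bs with
  | nil => exact absurd rfl hbs
  | cons c cs =>
    by_cases hh : PySem.List.pyGet? ln.toList 0 = some ' ' <;> simp [hh]

theorem pvStepBlocks_ne_nil (bs : List (List String)) (hbs : bs ≠ []) (ln : String) :
    pvStepBlocks bs ln ≠ [] := by
  unfold pvStepBlocks
  by_cases hh : PySem.List.pyGet? ln.toList 0 = some ' ' <;> simp [hh, hbs]

theorem pvFoldBlocks_cons (ls : List String) (b : List String) (bs : List (List String))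
    (hbs : bs ≠ []) : ls.foldl pvStepBlocks (b :: bs) = b :: ls.foldl pvStepBlocks bs := by
  induction ls generalizing bs with
  | nil => rfl
  | cons x tl ih =>
    simp only [List.foldl_cons, pvStepBlocks_cons b bs hbs x]
    exact ih _ (pvStepBlocks_ne_nil bs hbs x)

-- the core invariant: A resumed from the state parsed out of an open block (hb :: cs)
-- computes what B computes on that open block followed by the remaining lines
theorem pvCore_open (ls : List String) (hk : ∀ l ∈ ls, pvLineKeep l = true)
    (d : PySem.Dict String (List String)) (hb : String) (cs : List String) :
    (let st := ls.foldl pvStepA (d, pvKeyOf hb, pvValsOf hb ++ cs.map PySem.Str.strip)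
     pvFlushA st.1 st.2.1 st.2.2)
      = (ls.foldl pvStepBlocks [hb :: cs]).foldl pvInsertBlock d := by
  induction ls generalizing d hb cs with
  | nil =>
    simpa using pvFlush_eq_insertBlock d hb cs
  | cons x tl ih =>
    have hx : pvLineKeep x = true := hk x (List.mem_cons_self ..)
    have hk' : ∀ l ∈ tl, pvLineKeep l = true := fun l hl => hk l (List.mem_cons_of_mem _ hl)
    simp only [List.foldl_cons, pvStepA_keep _ x hx]
    by_cases hh : PySem.List.pyGet? x.toList 0 = some ' '
    · -- continuation line: A appends strip x; B extends the open block
      have hstep : pvStepBlocks [hb :: cs] x = [hb :: (cs ++ [x])] := by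
        unfold pvStepBlocks; simp [hh]
      rw [hstep]
      have := ih hk' d hb (cs ++ [x])
      simp only [List.map_append, ← List.append_assoc] at this
      simpa [hh] using this
    · -- header line: A flushes and opens (x); B starts a new block [x]
      have hstep : pvStepBlocks [hb :: cs] x = (hb :: cs) :: [[x]] := by
        unfold pvStepBlocks; simp [hh]
      rw [hstep, pvFoldBlocks_cons tl (hb :: cs) [[x]] (by simp), List.foldl_cons,
        ← pvFlush_eq_insertBlock d hb cs]
      have := ih hk' (pvFlushA d (pvKeyOf hb) (pvValsOf hb ++ cs.map PySem.Str.strip)) x []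
      simpa [hh] using this

-- same, from the initial no-open-block state (key None; pending values are never flushed)
theorem pvCore_closed (ls : List String) (hk : ∀ l ∈ ls, pvLineKeep l = true)
    (d : PySem.Dict String (List String)) (v : List String) :
    (let st := ls.foldl pvStepA (d, none, v)
     pvFlushA st.1 st.2.1 st.2.2)
      = (ls.foldl pvStepBlocks []).foldl pvInsertBlock d := by
  induction ls generalizing v with
  | nil => rfl
  | cons x tl ih =>
    have hx : pvLineKeep x = true := hk x (List.mem_cons_self ..)
    have hk' : ∀ l ∈ tl, pvLineKeep l = true := fun l hl => hk l (List.mem_cons_of_mem _ hl)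
    simp only [List.foldl_cons, pvStepA_keep _ x hx]
    by_cases hh : PySem.List.pyGet? x.toList 0 = some ' '
    · have hstep : pvStepBlocks [] x = [] := by unfold pvStepBlocks; simp [hh]
      rw [hstep]
      simpa [hh] using ih hk' (v ++ [PySem.Str.strip x])
    · have hstep : pvStepBlocks [] x = [[x]] := by unfold pvStepBlocks; simp [hh]
      rw [hstep]
      have := pvCore_open tl hk' (pvFlushA d none v) x []
      simpa [hh, pvFlushA] using this

-- ===== VERDICT (by name: the statement is the Claim_ definition above) =====
theorem parse_kegg_flat_py_spec : Claim_equal_parse_kegg_flat_py := by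
  intro text _
  unfold Spec_parse_kegg_flat_py parse_kegg_flat_py parse_kegg_flat_py_alt
  rw [pvFoldA_filter]
  have hk : ∀ l ∈ ((PySem.Str.split? text "\n").getD []).filter pvLineKeep, pvLineKeep l = true :=
    fun l hl => (List.mem_filter.mp hl).2
  exact congrArg PySem.Dict.items (pvCore_closed _ hk PySem.Dict.empty [])
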